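-- pv_equiv track=rewrite | github.com/Alexander-D-Karpov/scripts | ege/СР/23.py | f
-- ===== SOURCE A (Python) =====
-- def f(n, path):
--     if n >= 24:
--         if n == 24:
--             if 6 in path:
--                 return 1
--         return 0
--
--     return (
--         f(n + 2, path + [n + 2]) + f(n * 2, path + [n * 2]) + f(n * 3, path + [n * 3])
--     )
-- ===== SOURCE B (Python) =====
-- def f(n, path):
--     if n > 24:
--         return 0
--     T = [0] * 73
--     T[24] = 1
--     for k in range(23, 0, -1):
--         T[k] = T[k + 2] + T[2 * k] + T[3 * k]
--     C = [0] * 73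
--     for k in range(5, 0, -1):
--         C[k] = sum(1 if m == 6 else C[m] for m in (k + 2, 2 * k, 3 * k))
--     return T[n] if 6 in path else C[n] * T[6]
-- ===== Notes on version B (the rewrite author's own statement) =====
-- stated objective: alternative
-- what changed: Replaced A's three-way branching recursion over explicit paths by two bottom-up DP tables (paths-to-24 and paths-through-6), combined by whether 6 is already in path.
import Mathlib
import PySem

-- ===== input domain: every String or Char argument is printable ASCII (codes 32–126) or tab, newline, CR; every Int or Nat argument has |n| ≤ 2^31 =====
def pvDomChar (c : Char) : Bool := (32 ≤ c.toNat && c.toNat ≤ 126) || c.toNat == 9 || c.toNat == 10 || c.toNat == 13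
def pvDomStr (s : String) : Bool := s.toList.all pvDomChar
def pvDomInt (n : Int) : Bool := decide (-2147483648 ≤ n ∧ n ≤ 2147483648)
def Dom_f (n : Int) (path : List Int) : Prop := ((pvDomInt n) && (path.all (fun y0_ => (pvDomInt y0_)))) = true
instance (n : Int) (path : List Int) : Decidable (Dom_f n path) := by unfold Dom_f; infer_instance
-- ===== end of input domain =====

-- B replaces A's branching recursion over explicit paths by two small bottom-up DP tables (alternative algorithm).

-- ===== PORT A =====
-- A recurses until n ≥ 24; for 1 ≤ n each step increases n, so fuel 30 is never
-- exhausted on inputs admitted by Pre_f (the fuel only makes the port total).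
def fAux : Nat → Int → List Int → Int
  | 0, _, _ => 0
  | fuel + 1, n, path =>
    if n ≥ 24 then
      if n = 24 then (if (6 : Int) ∈ path then 1 else 0) else 0
    else
      fAux fuel (n + 2) (path ++ [n + 2]) + fAux fuel (n * 2) (path ++ [n * 2]) +
        fAux fuel (n * 3) (path ++ [n * 3])

def f (n : Int) (path : List Int) : Int := fAux 30 n path

-- ===== PORT B =====
-- one term of the C-table sum: 1 if m == 6 else C[m]
def cTerm (c : List Int) (m : Int) : Int := if m = 6 then 1 else c.getD m.toNat 0

def f_alt (n : Int) (path : List Int) : Int :=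
  if n > 24 then 0
  else
    let T0 : List Int := (List.replicate 73 (0 : Int)).set 24 1
    let T : List Int :=
      (PySem.List.pyRange 23 0 (-1)).foldl
        (fun t k =>
          t.set k.toNat (t.getD (k + 2).toNat 0 + t.getD (2 * k).toNat 0 + t.getD (3 * k).toNat 0))
        T0
    let C : List Int :=
      (PySem.List.pyRange 5 0 (-1)).foldl
        (fun c k => c.set k.toNat (cTerm c (k + 2) + cTerm c (2 * k) + cTerm c (3 * k)))
        (List.replicate 73 (0 : Int))
    if (6 : Int) ∈ path then T.getD n.toNat 0 else C.getD n.toNat 0 * T.getD 6 0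

-- ===== PRECONDITION & SPEC =====
-- Pre_f excludes n ≤ 0, on which the Python A recurses forever (RecursionError).
def Pre_f (n : Int) (path : List Int) : Prop := 1 ≤ n
instance (n : Int) (path : List Int) : Decidable (Pre_f n path) := by unfold Pre_f; infer_instance

def pvWitness_f : Int × List Int := (1, [6])

def Spec_f (n : Int) (path : List Int) (out : Int) : Prop := out = f_alt n path
instance (n : Int) (path : List Int) (out : Int) : Decidable (Spec_f n path out) := by unfold Spec_f; infer_instance

-- ===== CLAIM (what is proved, stated in full; the proofs are below) =====
def Claim_equal_f : Prop := ∀ (n : Int) (path : List Int), Dom_f n path → Pre_f n path → Spec_f n path (f n path)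

-- ===== LEMMAS AND PROOFS =====

-- fAux depends on path only through membership of 6
theorem fAux_split (fuel : Nat) : ∀ (n : Int) (path : List Int),
    fAux fuel n path = if (6 : Int) ∈ path then fAux fuel n [6] else fAux fuel n [] := by
  induction fuel with
  | zero => intro n path; simp [fAux]
  | succ fuel ih =>
    intro n path
    by_cases h : (6 : Int) ∈ path
    · simp only [h, if_true]
      by_cases hge : n ≥ 24
      · simp [fAux, hge, h]
      · simp only [fAux, hge, if_false]
        rw [ih (n + 2) (path ++ [n + 2]), ih (n * 2) (path ++ [n * 2]),
            ih (n * 3) (path ++ [n * 3]),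
            ih (n + 2) ([6] ++ [n + 2]), ih (n * 2) ([6] ++ [n * 2]),
            ih (n * 3) ([6] ++ [n * 3])]
        simp [h]
    · simp only [h, if_false]
      by_cases hge : n ≥ 24
      · simp [fAux, hge, h]
      · simp only [fAux, hge, if_false]
        rw [ih (n + 2) (path ++ [n + 2]), ih (n * 2) (path ++ [n * 2]),
            ih (n * 3) (path ++ [n * 3]),
            ih (n + 2) ([] ++ [n + 2]), ih (n * 2) ([] ++ [n * 2]),
            ih (n * 3) ([] ++ [n * 3])]
        simp [h]

-- f_alt depends on path only through membership of 6
theorem f_alt_split (n : Int) (path : List Int) :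
    f_alt n path = if (6 : Int) ∈ path then f_alt n [6] else f_alt n [] := by
  by_cases h : (6 : Int) ∈ path <;> simp [f_alt, h]

theorem big_case (n : Int) (hn : 24 < n) (path : List Int) : f n path = f_alt n path := by
  have h24 : ¬ n = 24 := by omega
  have hge : n ≥ 24 := by omega
  simp [f, fAux, hge, h24, f_alt, hn]

theorem f_spec' : ∀ (n : Int) (path : List Int), Dom_f n path → Pre_f n path → f n path = f_alt n path := by
  intro n path _ hpre
  by_cases hbig : 24 < n
  · exact big_case n hbig path
  · have hle : n ≤ 24 := by omega
    have h1 : 1 ≤ n := hpre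
    rw [f, fAux_split, f_alt_split]
    by_cases h : (6 : Int) ∈ path <;> simp only [h, if_true, if_false] <;>
      (interval_cases n <;> decide)

-- ===== VERDICT (by name: the statement is the Claim_ definition above) =====
theorem f_spec : Claim_equal_f := by
  intro n path hdom hpre
  unfold Spec_f
  exact f_spec' n path hdom hpre
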